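-- pv_equiv track=rewrite | github.com/RR-DSE/pcr-workplan | pcr-workplan/tools.py | CoalesceTable
-- ===== SOURCE A (Python) =====
-- def CoalesceTable(dSrc, sKey, lsFields):
--   dTemp = dict()
--   dRes = list()
--   lsResHeader = list()
--   try:
--     lsResHeader.append(sKey)
--     for sField in lsFields:
--       lsResHeader.append(sField)
--     for dRow in dSrc[1]:
--       if dRow[sKey] not in dTemp:
--         dTemp[dRow[sKey]] = dict()
--         dTemp[dRow[sKey]][sKey] = dRow[sKey]
--         for sField in lsFields:
--           dTemp[dRow[sKey]][sField] = None
--       for sField in lsFields: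
--         if dRow[sField] != None and dRow[sField] != "":
--           dTemp[dRow[sKey]][sField] = dRow[sField]
--     for sKey in sorted(dTemp.keys()):
--       bOK = True
--       for sField in lsFields:
--         if dTemp[sKey][sField] == None:
--           bOK = False
--           break
--       if bOK:
--         dRes.append(dTemp[sKey])
--   except:
--     raise
--   dResTable = (lsResHeader, dRes)
--   return dResTable
-- ===== SOURCE B (Python) =====
-- def CoalesceTable(dSrc, sKey, lsFields):
--   # bucket rows by key value (first-occurrence order), then reduce each bucket
--   groups = {}
--   for dRow in dSrc[1]:
--     groups.setdefault(dRow[sKey], []).append(dRow)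
--
--   def coalesce(grp, sField):
--     val = None
--     for dRow in grp:
--       v = dRow[sField]
--       if v is not None and v != "":
--         val = v
--     return val
--
--   def build(k):
--     rec = {sKey: k}
--     for sField in lsFields:
--       rec[sField] = coalesce(groups[k], sField)
--     return rec
--
--   recs = [build(k) for k in sorted(groups.keys())]
--   dRes = [rec for rec in recs if all(rec[sField] is not None for sField in lsFields)]
--   return ([sKey] + list(lsFields), dRes)
-- ===== Notes on version B (the rewrite author's own statement) =====
-- stated objective: alternative
-- what changed: Replaces A's interleaved init-None-then-overwrite single pass over rows (mutating one shared per-key record dict) by a bucket-then-reduce pipeline: one pass grouping rows by key, then per sorted key a record built field-by-field as the last non-empty value of the group, followed by a map-then-filter completeness pass.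
import Mathlib
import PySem

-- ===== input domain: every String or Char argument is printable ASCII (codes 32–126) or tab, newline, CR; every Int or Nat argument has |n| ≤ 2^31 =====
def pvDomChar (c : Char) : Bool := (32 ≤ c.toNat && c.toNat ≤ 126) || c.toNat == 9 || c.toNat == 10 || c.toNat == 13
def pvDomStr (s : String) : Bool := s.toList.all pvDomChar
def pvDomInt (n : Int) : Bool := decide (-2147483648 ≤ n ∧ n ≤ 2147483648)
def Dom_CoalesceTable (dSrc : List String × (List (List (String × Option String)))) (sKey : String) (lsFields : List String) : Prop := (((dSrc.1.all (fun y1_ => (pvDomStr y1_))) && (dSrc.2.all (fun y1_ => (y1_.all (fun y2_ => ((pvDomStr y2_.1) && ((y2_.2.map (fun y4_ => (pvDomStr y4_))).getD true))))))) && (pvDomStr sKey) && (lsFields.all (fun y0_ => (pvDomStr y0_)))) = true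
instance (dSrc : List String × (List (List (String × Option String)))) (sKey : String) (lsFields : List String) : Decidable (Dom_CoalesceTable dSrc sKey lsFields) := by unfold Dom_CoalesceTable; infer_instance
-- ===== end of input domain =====

-- B coalesces each key group in one reduce step (bucket-then-reduce, map-then-filter) instead of A's
-- interleaved init-then-overwrite pass; same cost, alternative decomposition. Equal return values on Pre_.

-- ===== PORT A =====
-- dRow[x]: first-match lookup; the `none` default is only reached outside Pre_ (Python: KeyError)
def pvRowGetA (dRow : List (String × Option String)) (x : String) : Option String :=
  (PySem.Dict.mk dRow).getD x none

-- the freshly initialised per-key record: {sKey: k, f: None for f in lsFields}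
def pvInitA (sKey : String) (lsFields : List String) (k : Option String) :
    PySem.Dict String (Option String) :=
  lsFields.foldl (fun e f => e.insert f none) (PySem.Dict.empty.insert sKey k)

def CoalesceTable (dSrc : List String × (List (List (String × Option String)))) (sKey : String) (lsFields : List String) : List String × (List (List (String × Option String))) :=
  let lsResHeader := lsFields.foldl (fun h f => h ++ [f]) [sKey]
  let dTemp := dSrc.2.foldl (fun dT dRow =>
      let k := pvRowGetA dRow sKey
      let dT := if dT.contains k then dT else dT.insert k (pvInitA sKey lsFields k)
      lsFields.foldl (fun dT f =>
          let v := pvRowGetA dRow f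
          if v ≠ none ∧ v ≠ some "" then dT.insert k ((dT.getD k PySem.Dict.empty).insert f v)
          else dT) dT)
    PySem.Dict.empty
  -- sorted(dTemp.keys()): under Pre_ the keys are all strings (or the single key None),
  -- so sorting by (·.getD "") is exactly Python's sort (mixed None/str, where Python raises, is outside Pre_)
  let dRes := (PySem.List.sorted dTemp.keys (fun o => o.getD "") false).foldl
      (fun res k =>
        let bOK := lsFields.all (fun f => !decide ((dTemp.getD k PySem.Dict.empty).getD f none = none))
        if bOK then res ++ [(dTemp.getD k PySem.Dict.empty).items] else res) []
  (lsResHeader, dRes)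

-- ===== PORT B =====
def pvRowGetB (dRow : List (String × Option String)) (x : String) : Option String :=
  (PySem.Dict.mk dRow).getD x none

-- last value of column f over the group that is neither None nor ""
def pvCoalesce (grp : List (List (String × Option String))) (f : String) : Option String :=
  grp.foldl (fun val dRow =>
    let v := pvRowGetB dRow f
    if v ≠ none ∧ v ≠ some "" then v else val) none

def pvBuild (sKey : String) (lsFields : List String) (grp : List (List (String × Option String))) (k : Option String) :
    PySem.Dict String (Option String) :=
  lsFields.foldl (fun rec f => rec.insert f (pvCoalesce grp f)) (PySem.Dict.empty.insert sKey k)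

def CoalesceTable_alt (dSrc : List String × (List (List (String × Option String)))) (sKey : String) (lsFields : List String) : List String × (List (List (String × Option String))) :=
  let groups := dSrc.2.foldl (fun g dRow => g.modify (pvRowGetB dRow sKey) [] (· ++ [dRow])) PySem.Dict.empty
  let recs := (PySem.List.sorted groups.keys (fun o => o.getD "") false).map
      (fun k => (pvBuild sKey lsFields (groups.getD k []) k).items)
  let dRes := recs.filter (fun rec => lsFields.all (fun f => ((PySem.Dict.mk rec).getD f none).isSome))
  (sKey :: lsFields, dRes)

-- ===== PRECONDITION & SPEC =====
-- Pre_ excludes exactly the inputs on which Python A raises: a row missing sKey or a listed field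
-- (KeyError in the first pass), and key columns mixing None with strings (sorted() raises TypeError).
def Pre_CoalesceTable (dSrc : List String × (List (List (String × Option String)))) (sKey : String) (lsFields : List String) : Prop :=
  (∀ dRow ∈ dSrc.2, (PySem.Dict.mk dRow).contains sKey = true ∧
      ∀ f ∈ lsFields, (PySem.Dict.mk dRow).contains f = true) ∧
  ((∀ dRow ∈ dSrc.2, ((PySem.Dict.mk dRow).getD sKey none).isSome = true) ∨
   (∀ dRow ∈ dSrc.2, (PySem.Dict.mk dRow).getD sKey none = none))
instance (dSrc : List String × (List (List (String × Option String)))) (sKey : String) (lsFields : List String) : Decidable (Pre_CoalesceTable dSrc sKey lsFields) := by unfold Pre_CoalesceTable; infer_instance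

def pvWitness_CoalesceTable : (List String × (List (List (String × Option String)))) × String × List String :=
  ((["k", "f"], [[("k", some "a"), ("f", some "")], [("k", some "a"), ("f", some "1")]]), "k", ["f"])

def Spec_CoalesceTable (dSrc : List String × (List (List (String × Option String)))) (sKey : String) (lsFields : List String) (out : List String × (List (List (String × Option String)))) : Prop := out = CoalesceTable_alt dSrc sKey lsFields
instance (dSrc : List String × (List (List (String × Option String)))) (sKey : String) (lsFields : List String) (out : List String × (List (List (String × Option String)))) : Decidable (Spec_CoalesceTable dSrc sKey lsFields out) := by unfold Spec_CoalesceTable; infer_instance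

-- ===== CLAIM (what is proved, stated in full; the proofs are below) =====
def Claim_equal_CoalesceTable : Prop := ∀ (dSrc : List String × (List (List (String × Option String)))) (sKey : String) (lsFields : List String), Dom_CoalesceTable dSrc sKey lsFields → Pre_CoalesceTable dSrc sKey lsFields → Spec_CoalesceTable dSrc sKey lsFields (CoalesceTable dSrc sKey lsFields)

-- ===== LEMMAS AND PROOFS =====

-- entry-level overwrite that one row performs on its key's record
def pvOW (lsFields : List String) (dRow : List (String × Option String))
    (e : PySem.Dict String (Option String)) : PySem.Dict String (Option String) :=
  lsFields.foldl (fun e f =>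
    let v := pvRowGetA dRow f
    if v ≠ none ∧ v ≠ some "" then e.insert f v else e) e

-- A's inner field loop, started on d.insert k e, only rewrites the entry at k
lemma pvL1 (lsFields : List String) (dRow : List (String × Option String))
    (d : PySem.Dict (Option String) (PySem.Dict String (Option String))) (k : Option String)
    (e : PySem.Dict String (Option String)) :
    lsFields.foldl (fun dT f =>
        let v := pvRowGetA dRow f
        if v ≠ none ∧ v ≠ some "" then dT.insert k ((dT.getD k PySem.Dict.empty).insert f v)
        else dT) (d.insert k e)
      = d.insert k (pvOW lsFields dRow e) := by
  induction lsFields generalizing e with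
  | nil => rfl
  | cons g gs ih =>
    simp only [List.foldl_cons, pvOW] at *
    by_cases h : pvRowGetA dRow g ≠ none ∧ pvRowGetA dRow g ≠ some ""
    · simp only [if_pos h, PySem.Dict.getD_insert_self, PySem.Dict.insert_insert_self]
      exact ih (e.insert g (pvRowGetA dRow g))
    · simp only [if_neg h]
      exact ih e

lemma pvInsertSelf {κ ν : Type} [BEq κ] [LawfulBEq κ]
    (d : PySem.Dict κ ν) (k : κ) (dflt : ν) (hn : d.keys.Nodup) (hc : d.contains k = true) :
    d.insert k (d.getD k dflt) = d := by
  apply PySem.Dict.ext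
  rw [PySem.Dict.items_insert_of_contains d _ hc]
  have h : ∀ p ∈ d.items, (if (p.1 == k) = true then (k, d.getD k dflt) else p) = p := by
    intro p hp
    by_cases hpk : p.1 = k
    · obtain ⟨a, b⟩ := p
      simp only at hpk
      subst hpk
      have hget : d.get? a = some b := PySem.Dict.get?_of_mem_items d hp hn
      have hgd : d.getD a dflt = b := by rw [PySem.Dict.getD_eq_get?_getD, hget]; rfl
      simp [hgd]
    · simp [hpk]
  calc List.map (fun p => if (p.1 == k) = true then (k, d.getD k dflt) else p) d.items
      = List.map id d.items := List.map_congr_left (by simpa using h)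
    _ = d.items := List.map_id d.items

-- A's per-row body in insert-normal form
lemma pvL3 (sKey : String) (lsFields : List String)
    (d : PySem.Dict (Option String) (PySem.Dict String (Option String)))
    (dRow : List (String × Option String)) (hn : d.keys.Nodup) :
    (let k := pvRowGetA dRow sKey
     let dT := if d.contains k then d else d.insert k (pvInitA sKey lsFields k)
     lsFields.foldl (fun dT f =>
        let v := pvRowGetA dRow f
        if v ≠ none ∧ v ≠ some "" then dT.insert k ((dT.getD k PySem.Dict.empty).insert f v)
        else dT) dT)
    = d.insert (pvRowGetA dRow sKey)
        (pvOW lsFields dRow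
          ((d.get? (pvRowGetA dRow sKey)).getD (pvInitA sKey lsFields (pvRowGetA dRow sKey)))) := by
  set k := pvRowGetA dRow sKey with hk
  by_cases hc : d.contains k = true
  · obtain ⟨e, he⟩ : ∃ e, d.get? k = some e := by
      have := PySem.Dict.contains_eq_isSome_get? d k
      rw [hc] at this
      exact Option.isSome_iff_exists.mp this.symm
    have h1 : d = d.insert k (d.getD k PySem.Dict.empty) := (pvInsertSelf d k _ hn hc).symm
    simp only [hc, if_true]
    conv_lhs => rw [h1]
    rw [pvL1]
    rw [he, PySem.Dict.getD_eq_get?_getD, he]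
    rfl
  · simp only [hc, if_false, Bool.false_eq_true]
    rw [pvL1]
    have hgk : d.get? k = none := by
      cases hgk : d.get? k with
      | none => rfl
      | some e => simp [PySem.Dict.contains_eq_isSome_get?, hgk] at hc
    rw [hgk]
    rfl

-- the whole A fold, rewritten into insert-normal form
lemma pvAfold (sKey : String) (lsFields : List String) :
    ∀ (rows : List (List (String × Option String)))
      (d : PySem.Dict (Option String) (PySem.Dict String (Option String))), d.keys.Nodup →
    rows.foldl (fun dT dRow =>
      let k := pvRowGetA dRow sKey
      let dT := if dT.contains k then dT else dT.insert k (pvInitA sKey lsFields k)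
      lsFields.foldl (fun dT f =>
          let v := pvRowGetA dRow f
          if v ≠ none ∧ v ≠ some "" then dT.insert k ((dT.getD k PySem.Dict.empty).insert f v)
          else dT) dT) d
    = rows.foldl (fun dT dRow =>
        dT.insert (pvRowGetA dRow sKey)
          (pvOW lsFields dRow
            ((dT.get? (pvRowGetA dRow sKey)).getD (pvInitA sKey lsFields (pvRowGetA dRow sKey))))) d := by
  intro rows
  induction rows with
  | nil => intro d _; rfl
  | cons r rs ih =>
    intro d hn
    simp only [List.foldl_cons]
    rw [pvL3 sKey lsFields d r hn]
    refine ih _ ?_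
    have := PySem.Dict.nodup_keys_foldl_insert_key [r] (fun r => pvRowGetA r sKey)
      (fun dT r => pvOW lsFields r ((dT.get? (pvRowGetA r sKey)).getD (pvInitA sKey lsFields (pvRowGetA r sKey)))) d hn
    simpa using this

-- master lemma: lookup in an upsert fold is a fold over the key's group
lemma pvUpsert {E : Type} (key : List (String × Option String) → Option String)
    (step : List (String × Option String) → E → E) (init : Option String → E) :
    ∀ (rows : List (List (String × Option String))) (d : PySem.Dict (Option String) E) (k : Option String),
    (rows.foldl (fun d r => d.insert (key r) (step r ((d.get? (key r)).getD (init (key r))))) d).get? k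
    = if rows.filter (fun r => key r == k) = [] then d.get? k
      else some ((rows.filter (fun r => key r == k)).foldl (fun e r => step r e)
                  ((d.get? k).getD (init k))) := by
  intro rows
  induction rows with
  | nil => intro d k; simp
  | cons r rs ih =>
    intro d k
    by_cases hk : key r = k
    · have hcons : List.filter (fun r => key r == k) (r :: rs)
          = r :: List.filter (fun r => key r == k) rs := by simp [hk]
      rw [List.foldl_cons, ih, hcons]
      have hget : ((d.insert (key r) (step r ((d.get? (key r)).getD (init (key r))))).get? k)
          = some (step r ((d.get? k).getD (init k))) := by
        rw [hk]; exact PySem.Dict.get?_insert_self _ _ _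
      rw [hget]
      by_cases hf : List.filter (fun r => key r == k) rs = []
      · simp [hf]
      · simp [hf]
    · have hcons : List.filter (fun r => key r == k) (r :: rs)
          = List.filter (fun r => key r == k) rs := by simp [hk]
      have hins : ((d.insert (key r) (step r ((d.get? (key r)).getD (init (key r))))).get? k)
          = d.get? k := by
        rw [PySem.Dict.get?_insert]; exact if_neg (fun h => hk h.symm)
      rw [List.foldl_cons, ih, hcons, hins]

-- getD after a plain per-field insert fold
lemma pvInsFoldGetD (fields : List String) (c : String → Option String)
    (d : PySem.Dict String (Option String)) (f : String) :
    (fields.foldl (fun e g => e.insert g (c g)) d).getD f none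
    = if f ∈ fields then c f else d.getD f none := by
  induction fields generalizing d with
  | nil => simp
  | cons g gs ih =>
    simp only [List.foldl_cons]
    rw [ih]
    by_cases h1 : f ∈ gs
    · simp [h1]
    · by_cases h2 : f = g
      · simp [h2, PySem.Dict.getD_insert_self]
      · rw [PySem.Dict.getD_insert, if_neg h2]
        simp [h1, h2]

-- getD after one row's conditional overwrite
lemma pvOWGetD (dRow : List (String × Option String)) (fields : List String)
    (d : PySem.Dict String (Option String)) (f : String) :
    (pvOW fields dRow d).getD f none
    = if f ∈ fields ∧ (pvRowGetA dRow f ≠ none ∧ pvRowGetA dRow f ≠ some "")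
      then pvRowGetA dRow f else d.getD f none := by
  induction fields generalizing d with
  | nil => simp [pvOW]
  | cons g gs ih =>
    simp only [pvOW, List.foldl_cons] at *
    rw [ih]
    by_cases h1 : f ∈ gs ∧ (pvRowGetA dRow f ≠ none ∧ pvRowGetA dRow f ≠ some "")
    · simp [h1, List.mem_cons]
    · by_cases h2 : f = g
      · subst h2
        by_cases h3 : pvRowGetA dRow f ≠ none ∧ pvRowGetA dRow f ≠ some ""
        · simp [h3, PySem.Dict.getD_insert_self]
        · simp [h3]
      · by_cases h3 : pvRowGetA dRow g ≠ none ∧ pvRowGetA dRow g ≠ some ""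
        · rw [if_pos h3, PySem.Dict.getD_insert, if_neg h2]
          simp [h1, List.mem_cons, h2]
        · rw [if_neg h3]
          simp [h1, List.mem_cons, h2]

-- getD through the whole group's overwrite fold
lemma pvGrpGetD (lsFields : List String) :
    ∀ (grp : List (List (String × Option String))) (d : PySem.Dict String (Option String)) (f : String),
    (grp.foldl (fun e r => pvOW lsFields r e) d).getD f none
    = if f ∈ lsFields
      then grp.foldl (fun val r =>
             if pvRowGetA r f ≠ none ∧ pvRowGetA r f ≠ some "" then pvRowGetA r f else val)
           (d.getD f none)
      else d.getD f none := by
  intro grp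
  induction grp with
  | nil => intro d f; by_cases h : f ∈ lsFields <;> simp [h]
  | cons r rs ih =>
    intro d f
    simp only [List.foldl_cons]
    rw [ih]
    by_cases h : f ∈ lsFields
    · rw [if_pos h, if_pos h, pvOWGetD]
      by_cases h3 : pvRowGetA r f ≠ none ∧ pvRowGetA r f ≠ some ""
      · simp [h, h3]
      · simp [h, h3]
    · rw [if_neg h, if_neg h, pvOWGetD, if_neg (by simp [h])]

-- keys are preserved by the group's overwrite fold
lemma pvOWKeys (lsFields : List String) (dRow : List (String × Option String)) :
    ∀ (d : PySem.Dict String (Option String)), (∀ f ∈ lsFields, f ∈ d.keys) →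
    (pvOW lsFields dRow d).keys = d.keys := by
  induction lsFields with
  | nil => intro d _; rfl
  | cons g gs ih =>
    intro d hc
    simp only [pvOW, List.foldl_cons] at *
    by_cases h3 : pvRowGetA dRow g ≠ none ∧ pvRowGetA dRow g ≠ some ""
    · rw [if_pos h3]
      have hcg : d.contains g = true := (PySem.Dict.contains_iff_mem_keys d g).mpr (hc g (by simp))
      have hkeys := PySem.Dict.keys_insert_of_contains d (pvRowGetA dRow g) hcg
      have hc' : ∀ f ∈ gs, f ∈ (d.insert g (pvRowGetA dRow g)).keys := by
        rw [hkeys]; exact fun f hf => hc f (List.mem_cons_of_mem _ hf)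
      rw [ih _ hc', hkeys]
    · rw [if_neg h3]
      exact ih d (fun f hf => hc f (List.mem_cons_of_mem _ hf))

lemma pvGrpKeys (lsFields : List String) :
    ∀ (grp : List (List (String × Option String))) (d : PySem.Dict String (Option String)),
    (∀ f ∈ lsFields, f ∈ d.keys) →
    (grp.foldl (fun e r => pvOW lsFields r e) d).keys = d.keys := by
  intro grp
  induction grp with
  | nil => intro d _; rfl
  | cons r rs ih =>
    intro d hc
    simp only [List.foldl_cons]
    have h1 := pvOWKeys lsFields r d hc
    rw [ih _ (by rw [h1]; exact hc), h1]

-- the per-group equality: A's init-then-overwrite record equals B's coalesced record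
lemma pvGroupRec (sKey : String) (lsFields : List String)
    (grp : List (List (String × Option String))) (k : Option String) :
    grp.foldl (fun e r => pvOW lsFields r e) (pvInitA sKey lsFields k)
    = pvBuild sKey lsFields grp k := by
  have hbase : (PySem.Dict.empty.insert sKey k : PySem.Dict String (Option String)).keys = [sKey] := by
    rw [PySem.Dict.keys_insert_of_not_contains PySem.Dict.empty k (PySem.Dict.contains_empty sKey),
        PySem.Dict.keys_empty]
    rfl
  have hInitK : (pvInitA sKey lsFields k).keys
      = PySem.Set.update (PySem.Dict.empty.insert sKey k : PySem.Dict String (Option String)).keys lsFields :=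
    PySem.Dict.keys_foldl_insert lsFields (fun _ _ => none) _
  have hBuildK : (pvBuild sKey lsFields grp k).keys
      = PySem.Set.update (PySem.Dict.empty.insert sKey k : PySem.Dict String (Option String)).keys lsFields :=
    PySem.Dict.keys_foldl_insert lsFields (fun _ f => pvCoalesce grp f) _
  have hbnod : (PySem.Dict.empty.insert sKey k : PySem.Dict String (Option String)).keys.Nodup := by
    rw [hbase]; simp
  have hInitNod : (pvInitA sKey lsFields k).keys.Nodup :=
    PySem.Dict.nodup_keys_foldl_insert lsFields (fun _ _ => none) _ hbnod
  have hBuildNod : (pvBuild sKey lsFields grp k).keys.Nodup :=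
    PySem.Dict.nodup_keys_foldl_insert lsFields (fun _ f => pvCoalesce grp f) _ hbnod
  have hmem : ∀ f ∈ lsFields, f ∈ (pvInitA sKey lsFields k).keys := by
    intro f hf
    rw [hInitK]
    exact (PySem.Set.mem_update _ _ _).mpr (Or.inr hf)
  have hLK : (grp.foldl (fun e r => pvOW lsFields r e) (pvInitA sKey lsFields k)).keys
      = (pvInitA sKey lsFields k).keys := pvGrpKeys lsFields grp _ hmem
  have hLnod : (grp.foldl (fun e r => pvOW lsFields r e) (pvInitA sKey lsFields k)).keys.Nodup := by
    rw [hLK]; exact hInitNod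
  have hval : ∀ j, (grp.foldl (fun e r => pvOW lsFields r e) (pvInitA sKey lsFields k)).getD j none
      = (pvBuild sKey lsFields grp k).getD j none := by
    intro j
    rw [pvGrpGetD]
    have hR : (pvBuild sKey lsFields grp k).getD j none
        = if j ∈ lsFields then pvCoalesce grp j
          else (PySem.Dict.empty.insert sKey k : PySem.Dict String (Option String)).getD j none :=
      pvInsFoldGetD lsFields (fun f => pvCoalesce grp f) _ j
    have hI : (pvInitA sKey lsFields k).getD j none
        = if j ∈ lsFields then none
          else (PySem.Dict.empty.insert sKey k : PySem.Dict String (Option String)).getD j none :=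
      pvInsFoldGetD lsFields (fun _ => none) _ j
    rw [hR]
    by_cases h : j ∈ lsFields
    · rw [if_pos h, if_pos h, hI, if_pos h]
      rfl
    · rw [if_neg h, if_neg h, hI, if_neg h]
  apply PySem.Dict.ext
  rw [PySem.Dict.items_eq_map_keys _ hLnod none, PySem.Dict.items_eq_map_keys _ hBuildNod none,
      hLK, hInitK, ← hBuildK]
  exact List.map_congr_left (fun j _ => by rw [hval j])

-- proof-side names for the two ports' building blocks (definitionally equal to the port bodies)
def pvTempRaw (sKey : String) (lsFields : List String) (rows : List (List (String × Option String))) :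
    PySem.Dict (Option String) (PySem.Dict String (Option String)) :=
  rows.foldl (fun dT dRow =>
      let k := pvRowGetA dRow sKey
      let dT := if dT.contains k then dT else dT.insert k (pvInitA sKey lsFields k)
      lsFields.foldl (fun dT f =>
          let v := pvRowGetA dRow f
          if v ≠ none ∧ v ≠ some "" then dT.insert k ((dT.getD k PySem.Dict.empty).insert f v)
          else dT) dT)
    PySem.Dict.empty

def pvTempN (sKey : String) (lsFields : List String) (rows : List (List (String × Option String))) :
    PySem.Dict (Option String) (PySem.Dict String (Option String)) :=
  rows.foldl (fun dT dRow =>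
      dT.insert (pvRowGetA dRow sKey)
        (pvOW lsFields dRow
          ((dT.get? (pvRowGetA dRow sKey)).getD (pvInitA sKey lsFields (pvRowGetA dRow sKey)))))
    PySem.Dict.empty

def pvGroupsRaw (sKey : String) (rows : List (List (String × Option String))) :
    PySem.Dict (Option String) (List (List (String × Option String))) :=
  rows.foldl (fun g dRow => g.modify (pvRowGetB dRow sKey) [] (· ++ [dRow])) PySem.Dict.empty

def pvGroupsN (sKey : String) (rows : List (List (String × Option String))) :
    PySem.Dict (Option String) (List (List (String × Option String))) :=
  rows.foldl (fun g dRow =>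
      g.insert (pvRowGetA dRow sKey) ((g.get? (pvRowGetA dRow sKey)).getD [] ++ [dRow]))
    PySem.Dict.empty

def pvPA (lsFields : List String) (dT : PySem.Dict (Option String) (PySem.Dict String (Option String)))
    (k : Option String) : Bool :=
  lsFields.all (fun f => !decide ((dT.getD k PySem.Dict.empty).getD f none = none))

def pvGA (dT : PySem.Dict (Option String) (PySem.Dict String (Option String))) (k : Option String) :
    List (String × Option String) :=
  (dT.getD k PySem.Dict.empty).items

def pvPB (lsFields : List String) (rec : List (String × Option String)) : Bool :=
  lsFields.all (fun f => ((PySem.Dict.mk rec).getD f none).isSome)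

def pvGB (sKey : String) (lsFields : List String)
    (groups : PySem.Dict (Option String) (List (List (String × Option String)))) (k : Option String) :
    List (String × Option String) :=
  (pvBuild sKey lsFields (groups.getD k []) k).items

def pvResOf (lsFields : List String)
    (dT : PySem.Dict (Option String) (PySem.Dict String (Option String))) :
    List (List (String × Option String)) :=
  (PySem.List.sorted dT.keys (fun o => o.getD "") false).foldl
    (fun res k => if pvPA lsFields dT k then res ++ [pvGA dT k] else res) []

def pvResBOf (sKey : String) (lsFields : List String)
    (groups : PySem.Dict (Option String) (List (List (String × Option String)))) :
    List (List (String × Option String)) :=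
  (((PySem.List.sorted groups.keys (fun o => o.getD "") false).map (pvGB sKey lsFields groups)).filter
    (pvPB lsFields))

lemma pvBoolEq (v : Option String) : (!decide (v = none)) = v.isSome := by cases v <;> simp

-- the second components agree
lemma pvResEq (sKey : String) (lsFields : List String) (rows : List (List (String × Option String))) :
    pvResOf lsFields (pvTempRaw sKey lsFields rows) = pvResBOf sKey lsFields (pvGroupsRaw sKey rows) := by
  have hnodE : (PySem.Dict.empty :
      PySem.Dict (Option String) (PySem.Dict String (Option String))).keys.Nodup := by
    rw [PySem.Dict.keys_empty]; exact List.nodup_nil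
  have hT : pvTempRaw sKey lsFields rows = pvTempN sKey lsFields rows :=
    pvAfold sKey lsFields rows PySem.Dict.empty hnodE
  have hG : pvGroupsRaw sKey rows = pvGroupsN sKey rows := by
    have hfun : (fun (g : PySem.Dict (Option String) (List (List (String × Option String)))) dRow =>
          g.modify (pvRowGetB dRow sKey) [] (· ++ [dRow]))
        = (fun g dRow =>
            g.insert (pvRowGetA dRow sKey) ((g.get? (pvRowGetA dRow sKey)).getD [] ++ [dRow])) := by
      funext g r
      unfold PySem.Dict.modify
      rw [PySem.Dict.getD_eq_get?_getD]
      rfl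
    unfold pvGroupsRaw pvGroupsN
    rw [hfun]
  have hKT : (pvTempN sKey lsFields rows).keys
      = PySem.Set.update ([] : List (Option String)) (rows.map (fun r => pvRowGetA r sKey)) := by
    have := PySem.Dict.keys_foldl_insert_key rows (fun r => pvRowGetA r sKey)
      (fun dT r => pvOW lsFields r
        ((dT.get? (pvRowGetA r sKey)).getD (pvInitA sKey lsFields (pvRowGetA r sKey))))
      PySem.Dict.empty
    simpa [PySem.Dict.keys_empty] using this
  have hKG : (pvGroupsN sKey rows).keys
      = PySem.Set.update ([] : List (Option String)) (rows.map (fun r => pvRowGetA r sKey)) := by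
    have := PySem.Dict.keys_foldl_insert_key rows (fun r => pvRowGetA r sKey)
      (fun g r => (g.get? (pvRowGetA r sKey)).getD [] ++ [r]) PySem.Dict.empty
    simpa [PySem.Dict.keys_empty] using this
  have hkeys : (pvGroupsN sKey rows).keys = (pvTempN sKey lsFields rows).keys := by rw [hKT, hKG]
  rw [hT, hG]
  unfold pvResOf pvResBOf
  rw [hkeys]
  rw [PySem.List.foldl_append_if (pvPA lsFields (pvTempN sKey lsFields rows))
        (pvGA (pvTempN sKey lsFields rows))
        (PySem.List.sorted (pvTempN sKey lsFields rows).keys (fun o => o.getD "") false) []]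
  rw [List.filter_map]
  rw [List.nil_append]
  -- per-key facts
  have hgrp : ∀ k ∈ PySem.List.sorted (pvTempN sKey lsFields rows).keys (fun o => o.getD "") false,
      pvGA (pvTempN sKey lsFields rows) k = pvGB sKey lsFields (pvGroupsN sKey rows) k := by
    intro k hk
    have hkmem : k ∈ (pvTempN sKey lsFields rows).keys := (PySem.List.mem_sorted _ _ _ _).mp hk
    rw [hKT] at hkmem
    have hkmem' : k ∈ rows.map (fun r => pvRowGetA r sKey) := by
      rcases (PySem.Set.mem_update _ _ _).mp hkmem with h | h
      · simp at h
      · exact h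
    obtain ⟨r, hr, hkr⟩ := List.mem_map.mp hkmem'
    have hrg : r ∈ rows.filter (fun r => pvRowGetA r sKey == k) :=
      List.mem_filter.mpr ⟨hr, by simp [hkr]⟩
    have hne : rows.filter (fun r => pvRowGetA r sKey == k) ≠ [] := List.ne_nil_of_mem hrg
    have hTget : (pvTempN sKey lsFields rows).get? k
        = some ((rows.filter (fun r => pvRowGetA r sKey == k)).foldl
            (fun e r => pvOW lsFields r e) (pvInitA sKey lsFields k)) := by
      have := pvUpsert (fun r => pvRowGetA r sKey) (fun r e => pvOW lsFields r e)
        (pvInitA sKey lsFields) rows PySem.Dict.empty k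
      rw [if_neg hne] at this
      simpa [PySem.Dict.get?_empty] using this
    have hBget : (pvGroupsN sKey rows).getD k []
        = rows.filter (fun r => pvRowGetA r sKey == k) := by
      have h0 := pvUpsert (fun r => pvRowGetA r sKey) (fun r e => e ++ [r])
        (fun _ => ([] : List (List (String × Option String)))) rows PySem.Dict.empty k
      rw [if_neg hne] at h0
      have h2 : (pvGroupsN sKey rows).get? k
          = some (rows.filter (fun r => pvRowGetA r sKey == k)) := by
        rw [PySem.Dict.get?_empty, PySem.List.foldl_append_singleton] at h0
        rw [show ((none : Option (List (List (String × Option String)))).getD []) = [] from rfl,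
            List.nil_append] at h0
        exact h0
      rw [PySem.Dict.getD_eq_get?_getD, h2]
      rfl
    unfold pvGA pvGB
    rw [hBget, PySem.Dict.getD_eq_get?_getD, hTget, Option.getD_some,
        pvGroupRec sKey lsFields _ k]
  have hpred : ∀ k ∈ PySem.List.sorted (pvTempN sKey lsFields rows).keys (fun o => o.getD "") false,
      pvPA lsFields (pvTempN sKey lsFields rows) k
        = (pvPB lsFields ∘ pvGB sKey lsFields (pvGroupsN sKey rows)) k := by
    intro k hk
    have h1 : (pvPB lsFields ∘ pvGB sKey lsFields (pvGroupsN sKey rows)) k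
        = pvPB lsFields (pvGA (pvTempN sKey lsFields rows) k) := by
      rw [Function.comp_apply, hgrp k hk]
    rw [h1]
    unfold pvPA pvPB pvGA
    have hmk : PySem.Dict.mk (((pvTempN sKey lsFields rows).getD k PySem.Dict.empty).items)
        = (pvTempN sKey lsFields rows).getD k PySem.Dict.empty := rfl
    rw [hmk]
    congr 1
    funext f
    rw [pvBoolEq]
  rw [List.filter_congr hpred]
  exact List.map_congr_left (fun k hk => hgrp k (List.mem_of_mem_filter hk))

-- the two ports agree everywhere (Pre_ is about faithfulness to Python, not needed for port equality)
lemma pvMain (dSrc : List String × (List (List (String × Option String)))) (sKey : String)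
    (lsFields : List String) :
    CoalesceTable dSrc sKey lsFields = CoalesceTable_alt dSrc sKey lsFields := by
  have e1 : CoalesceTable dSrc sKey lsFields
      = (lsFields.foldl (fun h f => h ++ [f]) [sKey],
         pvResOf lsFields (pvTempRaw sKey lsFields dSrc.2)) := rfl
  have e2 : CoalesceTable_alt dSrc sKey lsFields
      = (sKey :: lsFields, pvResBOf sKey lsFields (pvGroupsRaw sKey dSrc.2)) := rfl
  rw [e1, e2]
  have hhd : lsFields.foldl (fun h f => h ++ [f]) [sKey] = sKey :: lsFields := by
    simpa using PySem.List.foldl_append_singleton lsFields [sKey]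
  rw [hhd, pvResEq sKey lsFields dSrc.2]

-- ===== VERDICT (by name: the statement is the Claim_ definition above) =====
theorem CoalesceTable_spec : Claim_equal_CoalesceTable := by
  intro dSrc sKey lsFields _ _
  unfold Spec_CoalesceTable
  exact pvMain dSrc sKey lsFields
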